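-- pv_equiv track=rewrite | github.com/rueckstiess/yanex | yanex/cli/commands/run.py | expand_dependency_slots
-- ===== SOURCE A (Python) =====
-- def expand_dependency_slots(
--     dependency_slots: list[tuple[str, list[str]]],
-- ) -> list[dict[str, str]]:
--     """Expand dependency slots into combinations via cross-product.
--
--     Each -D flag represents a named dependency slot. This function generates
--     all combinations, taking one dependency from each slot.
--
--     Args:
--         dependency_slots: List of (slot_name, [exp_ids]) tuples.
--                           E.g., [("data", ["exp1", "exp2"]), ("model", ["exp3"])]
--
--     Returns:
--         List of {slot_name: exp_id} dicts, one per experiment.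
--         E.g., [{"data": "exp1", "model": "exp3"}, {"data": "exp2", "model": "exp3"}]
--
--     Example:
--         expand_dependency_slots([("data", ["a", "b"]), ("model", ["c"])])
--         # Returns: [{"data": "a", "model": "c"}, {"data": "b", "model": "c"}]
--     """
--     if not dependency_slots:
--         return [{}]  # Single experiment with no dependencies
--
--     import itertools
--
--     slot_names = [slot for slot, _ in dependency_slots]
--     id_lists = [ids for _, ids in dependency_slots]
--
--     return [
--         dict(zip(slot_names, combo, strict=True))
--         for combo in itertools.product(*id_lists)
--     ]
-- ===== SOURCE B (Python) =====
-- def expand_dependency_slots(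
--     dependency_slots: list[tuple[str, list[str]]],
-- ) -> list[dict[str, str]]:
--     """Iterative fold: extend partial combinations slot by slot."""
--     result = [{}]
--     for slot, ids in dependency_slots:
--         result = [{**partial, slot: eid} for partial in result for eid in ids]
--     return result
-- ===== Notes on version B (the rewrite author's own statement) =====
-- stated objective: simpler
-- what changed: Replaces itertools.product over column lists plus dict(zip(...)) with a single iterative fold that extends partial combination dicts slot by slot.
import Mathlib
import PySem

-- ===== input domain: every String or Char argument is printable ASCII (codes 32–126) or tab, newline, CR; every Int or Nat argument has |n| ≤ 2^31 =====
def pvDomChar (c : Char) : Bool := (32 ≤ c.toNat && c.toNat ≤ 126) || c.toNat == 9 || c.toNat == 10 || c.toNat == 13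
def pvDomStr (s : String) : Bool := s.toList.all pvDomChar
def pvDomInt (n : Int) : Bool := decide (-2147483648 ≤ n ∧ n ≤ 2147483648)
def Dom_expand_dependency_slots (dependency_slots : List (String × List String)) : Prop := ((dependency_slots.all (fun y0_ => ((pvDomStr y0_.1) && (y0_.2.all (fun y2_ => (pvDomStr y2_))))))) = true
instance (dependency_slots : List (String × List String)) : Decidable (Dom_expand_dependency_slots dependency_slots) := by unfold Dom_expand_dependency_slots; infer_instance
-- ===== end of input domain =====

-- B replaces itertools.product + dict(zip) with a single iterative fold that extends partial
-- combination dicts slot by slot (objective: simpler — no product helper, no zip).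


-- ===== PORT A =====
-- itertools.product(*id_lists): first list varies slowest
def pvProdA (ls : List (List String)) : List (List String) :=
  match ls with
  | [] => [[]]
  | l :: rest => l.flatMap (fun x => (pvProdA rest).map (fun c => x :: c))

def expand_dependency_slots (dependency_slots : List (String × List String)) : List (List (String × String)) :=
  if dependency_slots = [] then [[]]  -- [{}]
  else
    let slot_names := dependency_slots.map (fun p => p.1)
    let id_lists := dependency_slots.map (fun p => p.2)
    (pvProdA id_lists).map (fun combo => (PySem.Dict.ofList (slot_names.zip combo)).items)
    -- zip is strict=True-safe: every combo has length id_lists.length = slot_names.length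

-- ===== PORT B =====
def expand_dependency_slots_alt (dependency_slots : List (String × List String)) : List (List (String × String)) :=
  (dependency_slots.foldl
      (fun res p => res.flatMap (fun partial_ => p.2.map (fun eid => partial_.insert p.1 eid)))
      [PySem.Dict.empty]).map (fun d => d.items)

-- ===== PRECONDITION & SPEC =====
def Spec_expand_dependency_slots (dependency_slots : List (String × List String)) (out : List (List (String × String))) : Prop := out = expand_dependency_slots_alt dependency_slots
instance (dependency_slots : List (String × List String)) (out : List (List (String × String))) : Decidable (Spec_expand_dependency_slots dependency_slots out) := by unfold Spec_expand_dependency_slots; infer_instance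

-- ===== CLAIM (what is proved, stated in full; the proofs are below) =====
def Claim_equal_expand_dependency_slots : Prop := ∀ (dependency_slots : List (String × List String)), Dom_expand_dependency_slots dependency_slots → Spec_expand_dependency_slots dependency_slots (expand_dependency_slots dependency_slots)

-- ===== LEMMAS AND PROOFS =====
-- all completions of a partial dict d through the remaining slots
def pvG (d : PySem.Dict String String) : List (String × List String) → List (PySem.Dict String String)
  | [] => [d]
  | p :: rest => p.2.flatMap (fun e => pvG (d.insert p.1 e) rest)

theorem pvB_eq (slots : List (String × List String)) (res : List (PySem.Dict String String)) :
    slots.foldl (fun res p => res.flatMap (fun partial_ => p.2.map (fun eid => partial_.insert p.1 eid))) res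
      = res.flatMap (fun d => pvG d slots) := by
  induction slots generalizing res with
  | nil => simp [pvG]
  | cons p rest ih => simp [pvG, List.foldl_cons, ih, List.flatMap_assoc, List.flatMap_map]

theorem pvA_eq (slots : List (String × List String)) (d : PySem.Dict String String) :
    (pvProdA (slots.map (fun p => p.2))).map
        (fun combo => ((slots.map (fun p => p.1)).zip combo).foldl (fun d q => d.insert q.1 q.2) d)
      = pvG d slots := by
  induction slots generalizing d with
  | nil => simp [pvProdA, pvG]
  | cons p rest ih => simp [pvProdA, pvG, List.map_flatMap, List.map_map, Function.comp_def, List.zip_cons_cons, List.foldl_cons, ih]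

theorem pvOfList_eq (ps : List (String × String)) :
    PySem.Dict.ofList ps = ps.foldl (fun d q => d.insert q.1 q.2) PySem.Dict.empty := by
  simp [PySem.Dict.ofList, PySem.Dict.update]

-- ===== VERDICT (by name: the statement is the Claim_ definition above) =====
theorem expand_dependency_slots_spec : Claim_equal_expand_dependency_slots := by
  intro slots _
  unfold Spec_expand_dependency_slots expand_dependency_slots expand_dependency_slots_alt
  rw [pvB_eq]
  by_cases h : slots = []
  · subst h; simp [pvG, PySem.Dict.empty]
  · simp only [h, if_false, List.flatMap_cons, List.flatMap_nil, List.append_nil]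
    rw [← pvA_eq slots PySem.Dict.empty]
    simp [pvOfList_eq]
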